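-- pv_equiv track=rewrite | github.com/Nifel13/Automatas | automat.py | cellular_automaton
-- ===== SOURCE A (Python) =====
-- def rule(num):
--     binary = format(num, '08b')
--     rules = {format(7 - i, '03b'): binary[i] for i in range(8)}
--     return rules
--
-- def cellular_automaton(rule_num, steps):
--     rules = rule(rule_num)
--     current_state = ['0'] * steps
--     current_state[steps // 2] = '1'  # Start with one cell in the middle
--     automaton = []
--
--     for _ in range(steps):
--         automaton.append(current_state)
--         current_state = ['0'] + current_state + ['0']
--         current_state = [rules[''.join(current_state[i:i+3])] for i in range(len(current_state) - 2)]
--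
--     return automaton
-- ===== SOURCE B (Python) =====
-- def cellular_automaton(rule_num, steps):
--     # Each row is one integer bitmask (cell i = bit steps-1-i).  A step builds
--     # the next row by OR-ing, for each live pattern p of the rule, the mask of
--     # positions whose (left, center, right) neighborhood equals p.
--     n = steps
--     mask = (1 << n) - 1
--     state = 1 << (n - 1 - n // 2)  # single live cell in the middle
--     grid = []
--     for _ in range(n):
--         grid.append(['1' if (state >> (n - 1 - i)) & 1 else '0' for i in range(n)])
--         left, right = state >> 1, (state << 1) & mask
--         nxt = 0
--         for p in range(8):
--             if (rule_num >> p) & 1: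
--                 nxt |= ((left if p & 4 else left ^ mask)
--                         & (state if p & 2 else state ^ mask)
--                         & (right if p & 1 else right ^ mask))
--         state = nxt
--     return grid
-- ===== Notes on version B (the rewrite author's own statement) =====
-- stated objective: alternative
-- what changed: B keeps each row as one integer bitmask and builds the next row by ORing 8 bitwise pattern-masks (one per neighborhood pattern) instead of A's per-cell loop joining 3-character string windows and looking them up in a dict of format strings; Pre_ keeps only elementary-CA rule numbers 0..255 and steps >= 1, excluding steps <= 0 (A raises IndexError), rule_num < 0 (A's format string puts a '-' into the table, so rows contain '-' or a later window raises KeyError) and rule_num > 255 (not an elementary-CA rule; …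
-- outside the precondition, e.g. on cellular_automaton(300, 2): A returns [['0', '1'], ['1', '1']], B returns [['0', '1'], ['0', '1']]; on cellular_automaton(-1, 2): A returns [['0', '1'], ['0', '0']], B returns [['0', '1'], ['1', '1']]; on cellular_automaton(30, 0): A raises IndexError, B raises ValueError
import Mathlib
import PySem

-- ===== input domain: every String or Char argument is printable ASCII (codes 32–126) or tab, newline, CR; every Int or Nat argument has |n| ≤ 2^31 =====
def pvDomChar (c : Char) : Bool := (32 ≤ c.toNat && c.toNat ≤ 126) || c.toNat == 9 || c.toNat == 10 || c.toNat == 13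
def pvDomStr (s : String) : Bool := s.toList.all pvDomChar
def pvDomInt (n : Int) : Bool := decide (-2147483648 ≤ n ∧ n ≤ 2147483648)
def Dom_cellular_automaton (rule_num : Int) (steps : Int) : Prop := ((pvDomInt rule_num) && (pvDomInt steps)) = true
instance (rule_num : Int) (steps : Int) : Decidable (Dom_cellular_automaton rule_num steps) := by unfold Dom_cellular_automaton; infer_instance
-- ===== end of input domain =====

-- B runs the automaton on integer bitmasks (one OR-mask per neighborhood pattern per step)
-- instead of A's per-cell dict lookups over 3-character string windows; claimed on the
-- elementary-CA domain 0 ≤ rule_num ≤ 255, steps ≥ 1 (see Pre_ below).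

-- ===== PORT A =====

-- port of format(num, '0<width>b'): binary digits of |num| zero-padded to the width,
-- a '-' sign (for negative num) in front, counting towards the width — exact for all ints
def pyFormatBin (width : Nat) (num : Int) : List Char :=
  let a := num.natAbs
  let w := if num < 0 then width - 1 else width
  let L := max w (PySem.Int.bitLength num)
  let ds := (List.range L).map (fun i => if a.testBit (L - 1 - i) then '1' else '0')
  if num < 0 then '-' :: ds else ds

def rule (num : Int) : PySem.Dict String String :=
  let binary := pyFormatBin 8 num
  (List.range 8).foldl (fun d i =>
      d.insert (String.ofList (pyFormatBin 3 (7 - (i : Int))))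
        (((PySem.List.pyGet? binary (i : Int)).map (fun c => String.ofList [c])).getD ""))
    PySem.Dict.empty

def cellular_automaton (rule_num : Int) (steps : Int) : List (List String) :=
  let rules := rule rule_num
  let cs0 := List.replicate steps.toNat "0"                    -- ['0'] * steps
  match PySem.List.pySet? cs0 (PySem.Int.floordiv steps 2) "1" with
  | none => []                                                 -- IndexError (steps ≤ 0); excluded by Pre_
  | some cs1 =>
    let res := (List.range steps.toNat).foldl (fun (st : List (List String) × List String) _ =>
        let automaton := st.1 ++ [st.2]
        let padded := ["0"] ++ st.2 ++ ["0"]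
        let next := (List.range (padded.length - 2)).map (fun (i : Nat) =>
            -- rules[...]: a KeyError is unreachable under Pre_ (every window is a 3-bit key)
            rules.getD (PySem.Str.join "" (PySem.List.slice padded (some (i : Int)) (some ((i : Int) + 3)))) "")
        (automaton, next)) ([], cs1)
    res.1

-- ===== PORT B =====
-- transliteration of Source B; the Python ints mask/state/left/right/nxt are nonnegative,
-- so they are carried as Nat
def cellular_automaton_alt (rule_num : Int) (steps : Int) : List (List String) :=
  let n := steps.toNat
  let mask := (1 <<< n) - 1
  let state := 1 <<< (n - 1 - n / 2)                           -- single live cell in the middle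
  let res := (List.range n).foldl (fun (st : List (List String) × Nat) _ =>
      let grid := st.1 ++ [(List.range n).map (fun i =>
          if (st.2 >>> (n - 1 - i)) &&& 1 ≠ 0 then "1" else "0")]
      let left := st.2 >>> 1
      let right := (st.2 <<< 1) &&& mask
      let nxt := (List.range 8).foldl (fun (acc : Nat) (p : Nat) =>
          if PySem.Int.band (rule_num >>> p) 1 ≠ 0 then        -- (rule_num >> p) & 1
            acc ||| ((if p &&& 4 ≠ 0 then left else left ^^^ mask)
                &&& (if p &&& 2 ≠ 0 then st.2 else st.2 ^^^ mask)
                &&& (if p &&& 1 ≠ 0 then right else right ^^^ mask))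
          else acc) 0
      (grid, nxt)) ([], state)
  res.1

-- ===== PRECONDITION & SPEC =====
-- Pre_ keeps the elementary-CA domain only: it excludes steps ≤ 0, where A raises
-- IndexError on the middle-cell assignment; rule_num < 0, where format's '-' sign enters
-- A's rule table (rows then carry '-' entries or a later window lookup raises KeyError);
-- and rule_num > 255, not an elementary-CA rule number, where A's table accidentally
-- reads the leading 8 binary digits of format's longer output.
def Pre_cellular_automaton (rule_num : Int) (steps : Int) : Prop :=
  1 ≤ steps ∧ 0 ≤ rule_num ∧ rule_num ≤ 255
instance (rule_num : Int) (steps : Int) : Decidable (Pre_cellular_automaton rule_num steps) := by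
  unfold Pre_cellular_automaton; infer_instance

def pvWitness_cellular_automaton : Int × Int := (30, 5)

def Spec_cellular_automaton (rule_num : Int) (steps : Int) (out : List (List String)) : Prop := out = cellular_automaton_alt rule_num steps
instance (rule_num : Int) (steps : Int) (out : List (List String)) : Decidable (Spec_cellular_automaton rule_num steps out) := by unfold Spec_cellular_automaton; infer_instance

-- ===== CLAIM (what is proved, stated in full; the proofs are below) =====
def Claim_equal_cellular_automaton : Prop := ∀ (rule_num : Int) (steps : Int), Dom_cellular_automaton rule_num steps → Pre_cellular_automaton rule_num steps → Spec_cellular_automaton rule_num steps (cellular_automaton rule_num steps)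

-- ===== LEMMAS AND PROOFS =====

def bitChar (b : Bool) : Char := if b then '1' else '0'
def bitStr (b : Bool) : String := if b then "1" else "0"

-- row rendering of an n-bit state (cell i = bit n-1-i)
def rowOf (n s : Nat) : List String := (List.range n).map (fun i => bitStr (s.testBit (n - 1 - i)))

-- the 8 bits A's rule table reads off format(num, '08b') are the top 8 bits of |num|
-- (equal to |num| itself under Pre_, where |num| ≤ 255)
def top8 (a : Nat) : Nat := a >>> (max 8 (PySem.Int.bitLength (a : Int)) - 8)

-- the mask B ORs into the next state for neighborhood pattern p
def maskP (n s p : Nat) : Nat :=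
  (if p &&& 4 ≠ 0 then s >>> 1 else (s >>> 1) ^^^ ((1 <<< n) - 1))
    &&& (if p &&& 2 ≠ 0 then s else s ^^^ ((1 <<< n) - 1))
    &&& (if p &&& 1 ≠ 0 then (s <<< 1) &&& ((1 <<< n) - 1)
         else ((s <<< 1) &&& ((1 <<< n) - 1)) ^^^ ((1 <<< n) - 1))

-- B's one step as a function (definitionally the fold body of the port)
def stepB (r n s : Nat) : Nat :=
  (List.range 8).foldl (fun acc p =>
      if (r >>> p) &&& 1 ≠ 0 then acc ||| maskP n s p else acc) 0

-- the cell at position k of A's zero-padded row (k = 0 and k = n+1 are the borders)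
def pcell (n s k : Nat) : Bool := if 1 ≤ k ∧ k ≤ n then s.testBit (n - k) else false

lemma ite_bit {α : Sort _} (x k : Nat) (a b : α) :
    (if (x >>> k) &&& 1 ≠ 0 then a else b) = if x.testBit k then a else b := by
  have h : ((x >>> k) &&& 1 ≠ 0) ↔ x.testBit k = true := by
    simp [Nat.testBit, Nat.land_comm]
  by_cases hb : x.testBit k
  · rw [if_pos (h.mpr hb), if_pos hb]
  · rw [if_neg (fun hc => hb (h.mp hc)), if_neg hb]

lemma cast_shiftRight (m k : Nat) : ((m : Int) >>> k) = ((m >>> k : Nat) : Int) := by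
  simp [Int.shiftRight_eq_div_pow, Nat.shiftRight_eq_div_pow]

lemma band_one_cast (m : Nat) : (PySem.Int.band ((m : Int)) 1 ≠ 0) ↔ ((m &&& 1 : Nat) ≠ 0) := by
  rw [show (1 : Int) = ((1 : Nat) : Int) from rfl, PySem.Int.band_natCast]
  simp
  omega

lemma or_fold_testBit (g : Nat → Nat) (l : List Nat) (acc j : Nat) :
    (l.foldl (fun a p => a ||| g p) acc).testBit j
      = (acc.testBit j || l.any (fun p => (g p).testBit j)) := by
  induction l generalizing acc with
  | nil => simp
  | cons x xs ih => simp [List.foldl_cons, ih, Nat.testBit_or, Bool.or_assoc]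

lemma stepB_body (r n s : Nat) :
    (fun (acc p : Nat) => if (r >>> p) &&& 1 ≠ 0 then acc ||| maskP n s p else acc)
      = (fun acc p => acc ||| (if r.testBit p then maskP n s p else 0)) := by
  funext acc p
  rw [ite_bit]
  by_cases h : r.testBit p <;> simp [h]

lemma stepB_testBit (r n s : Nat) (hs : s < 2 ^ n) (j : Nat) (hj : j < n) :
    (stepB r n s).testBit j =
      r.testBit (4 * (s.testBit (j + 1)).toNat + 2 * (s.testBit j).toNat +
        (decide (1 ≤ j) && s.testBit (j - 1)).toNat) := by
  have hjn : decide (j < n) = true := by simpa using hj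
  unfold stepB
  rw [stepB_body, or_fold_testBit]
  rw [show (List.range 8) = [0,1,2,3,4,5,6,7] from by decide]
  simp only [List.any_cons, List.any_nil, apply_ite (fun x => Nat.testBit x j),
    Nat.zero_testBit, maskP, Nat.one_shiftLeft, Nat.testBit_and, Nat.testBit_xor,
    Nat.testBit_shiftRight, Nat.testBit_shiftLeft, Nat.testBit_two_pow_sub_one]
  norm_num [hjn, Nat.add_comm 1 j]
  cases hA : s.testBit (j + 1) <;> cases hB : s.testBit j <;>
    cases hD : decide (1 ≤ j) <;> cases hE : s.testBit (j - 1) <;>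
      simp [hA, hB, hD, hE, Nat.testBit_zero,
        show (2:Nat) &&& 4 = 0 from by decide, show (3:Nat) &&& 4 = 0 from by decide,
        show (3:Nat) &&& 2 = 2 from by decide, show (4:Nat) &&& 2 = 0 from by decide,
        show (5:Nat) &&& 4 = 4 from by decide, show (5:Nat) &&& 2 = 0 from by decide,
        show (6:Nat) &&& 4 = 4 from by decide, show (6:Nat) &&& 2 = 2 from by decide,
        show (7:Nat) &&& 4 = 4 from by decide, show (7:Nat) &&& 2 = 2 from by decide]

lemma maskP_testBit_ge (n s p i : Nat) (hs : s < 2 ^ n) (hi : n ≤ i) :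
    (maskP n s p).testBit i = false := by
  have hsi : s.testBit i = false :=
    Nat.testBit_lt_two_pow (Nat.lt_of_lt_of_le hs (Nat.pow_le_pow_right (by norm_num) hi))
  unfold maskP
  by_cases h2 : p &&& 2 ≠ 0 <;>
    simp [h2, Nat.one_shiftLeft, Nat.testBit_and, Nat.testBit_xor,
      Nat.testBit_two_pow_sub_one, Nat.not_lt.mpr hi, hsi]

lemma stepB_lt (r n s : Nat) (hs : s < 2 ^ n) : stepB r n s < 2 ^ n := by
  by_contra hlt
  obtain ⟨i, hi, hbit⟩ := Nat.exists_ge_and_testBit_of_ge_two_pow (Nat.le_of_not_lt hlt)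
  unfold stepB at hbit
  rw [stepB_body, or_fold_testBit] at hbit
  simp [maskP_testBit_ge n s _ i hs hi, apply_ite (fun x => Nat.testBit x i),
    Nat.zero_testBit] at hbit

lemma ruleGet (num : Int) (h : 0 ≤ num) (q : Nat) (hq : q < 8) :
    (rule num).getD (String.ofList (pyFormatBin 3 (q : Int))) "" =
      bitStr ((top8 num.natAbs).testBit q) := by
  have hnneg : ¬ num < 0 := Int.not_lt.mpr h
  have hcast : ((num.natAbs : Nat) : Int) = num := Int.natAbs_of_nonneg h
  have hL8 : 8 ≤ max 8 (PySem.Int.bitLength num) := le_max_left _ _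
  set a := num.natAbs with ha
  set L := max 8 (PySem.Int.bitLength num) with hLdef
  have hbin : pyFormatBin 8 num
      = (List.range L).map (fun i => if a.testBit (L - 1 - i) then '1' else '0') := by
    simp only [pyFormatBin, if_neg hnneg]
    rfl
  have hitems : (rule num).items
      = (List.range 8).map (fun i =>
          (String.ofList (pyFormatBin 3 (7 - (i : Int))),
           ((PySem.List.pyGet? (pyFormatBin 8 num) (i : Int)).map
              (fun c => String.ofList [c])).getD "")) := by
    unfold rule
    rw [PySem.Dict.items_foldl_insert_fresh _ _ _ _ (by intro x hx; rfl) (by decide)]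
    rfl
  have hkeys : (rule num).keys.Nodup := by
    have hk : (rule num).keys
        = (List.range 8).map (fun i => String.ofList (pyFormatBin 3 (7 - (i : Int)))) := by
      simp only [PySem.Dict.keys, hitems, List.map_map]
      rfl
    rw [hk]; decide
  have hmem : ((String.ofList (pyFormatBin 3 ((q : Nat) : Int))),
      ((PySem.List.pyGet? (pyFormatBin 8 num) ((7 - q : Nat) : Int)).map
        (fun c => String.ofList [c])).getD "") ∈ (rule num).items := by
    rw [hitems]
    have h7 : (7 : Int) - ((7 - q : Nat) : Int) = (q : Int) := by omega
    have hmm := List.mem_map_of_mem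
      (f := fun i : Nat => (String.ofList (pyFormatBin 3 (7 - (i : Int))),
        ((PySem.List.pyGet? (pyFormatBin 8 num) (i : Int)).map (fun c => String.ofList [c])).getD ""))
      (List.mem_range.mpr (show 7 - q < 8 by omega))
    simpa only [h7] using hmm
  have hget := PySem.Dict.get?_of_mem_items _ hmem hkeys
  rw [PySem.Dict.getD_of_get?_eq_some _ _ hget]
  rw [hbin, PySem.List.pyGet?_natCast]
  rw [List.getElem?_map]
  rw [List.getElem?_range (by omega : 7 - q < L)]
  have harith : L - 1 - (7 - q) = L - 8 + q := by omega
  have htop : (top8 a).testBit q = a.testBit (L - 8 + q) := by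
    unfold top8
    rw [Nat.testBit_shiftRight, ha, hcast, ← hLdef]
  rw [htop]
  simp only [Option.map_some, Option.getD_some, harith]
  cases hb : a.testBit (L - 8 + q) <;> simp [hb, bitStr]

lemma join_bits (b1 b2 b3 : Bool) :
    PySem.Str.join "" [bitStr b1, bitStr b2, bitStr b3] =
      String.ofList [bitChar b1, bitChar b2, bitChar b3] := by
  revert b1 b2 b3; decide

lemma key_bits (b1 b2 b3 : Bool) :
    String.ofList [bitChar b1, bitChar b2, bitChar b3] =
      String.ofList (pyFormatBin 3 ((4 * b1.toNat + 2 * b2.toNat + b3.toNat : Nat) : Int)) := by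
  revert b1 b2 b3; decide

lemma padded_eq (n s : Nat) (hs : s < 2 ^ n) :
    ["0"] ++ rowOf n s ++ ["0"] = (List.range (n + 2)).map (fun k => bitStr (pcell n s k)) := by
  have hlen : (rowOf n s).length = n := by simp [rowOf]
  apply List.ext_getElem
  · simp [rowOf]
  intro k hk1 hk2
  simp only [List.getElem_map, List.getElem_range]
  cases k with
  | zero => simp [pcell, bitStr]
  | succ k =>
    have hkn2 : k < n + 1 := by
      simp only [List.length_append, List.length_singleton, hlen] at hk1
      omega
    have hstep : (["0"] ++ rowOf n s ++ ["0"])[k + 1]'(by simp [hlen]; omega) = (rowOf n s ++ ["0"])[k]'(by simp [hlen]; omega) := by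
      rfl
    rw [hstep]
    by_cases hkn : k < n
    · rw [List.getElem_append_left (by omega : k < (rowOf n s).length)]
      simp only [rowOf, List.getElem_map, List.getElem_range]
      unfold pcell
      rw [if_pos ⟨by omega, by omega⟩]
      congr 2
      omega
    · have hk : k = n := by omega
      rw [List.getElem_append_right (by omega : (rowOf n s).length ≤ k)]
      unfold pcell
      rw [if_neg (by omega)]
      simp [hlen, hk, bitStr]

lemma take3 {α : Type} (m i : Nat) (f : Nat → α) (h : i + 3 ≤ m) :
    (((List.range m).map f).drop i).take 3 = [f i, f (i + 1), f (i + 2)] := by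
  apply List.ext_getElem
  · simp
    omega
  intro j hj1 hj2
  simp only [List.length_take, List.length_drop, List.length_map, List.length_range] at hj1
  have hj3 : j < 3 := by omega
  simp only [List.getElem_take, List.getElem_drop, List.getElem_map, List.getElem_range]
  interval_cases j <;> rfl

lemma init_row (n : Nat) (hn : 1 ≤ n) :
    (List.replicate n "0").set (n / 2) "1" = rowOf n (1 <<< (n - 1 - n / 2)) := by
  apply List.ext_getElem
  · simp [rowOf]
  intro i hi1 hi2
  have hi : i < n := by simpa using hi1
  simp only [rowOf, List.getElem_map, List.getElem_range]
  rw [List.getElem_set]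
  rw [Nat.one_shiftLeft, Nat.testBit_two_pow]
  have hhalf : n / 2 < n := by omega
  by_cases h : n / 2 = i
  · rw [if_pos h]
    have : n - 1 - n / 2 = n - 1 - i := by omega
    simp [this, bitStr]
  · rw [if_neg h]
    have hne : n - 1 - n / 2 ≠ n - 1 - i := by omega
    simp [List.getElem_replicate, hne, bitStr]

lemma step_eq (num : Int) (hnum : 0 ≤ num) (n s : Nat) (hn : 1 ≤ n) (hs : s < 2 ^ n) :
    (List.range ((["0"] ++ rowOf n s ++ ["0"]).length - 2)).map (fun (i : Nat) =>
        (rule num).getD (PySem.Str.join ""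
          (PySem.List.slice (["0"] ++ rowOf n s ++ ["0"]) (some (i : Int)) (some ((i : Int) + 3)))) "")
      = rowOf n (stepB (top8 num.natAbs) n s) := by
  have hlen : (["0"] ++ rowOf n s ++ ["0"]).length - 2 = n := by simp [rowOf]
  rw [hlen]
  show _ = (List.range n).map (fun i => bitStr ((stepB (top8 num.natAbs) n s).testBit (n - 1 - i)))
  apply List.map_congr_left
  intro i hi
  have hi' : i < n := List.mem_range.mp hi
  rw [padded_eq n s hs]
  rw [show ((i : Int) + 3) = ((i : Int) + ((3 : Nat) : Int)) from by norm_num]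
  rw [PySem.List.slice_natCast_add]
  rw [take3 (n + 2) i _ (by omega)]
  rw [join_bits, key_bits]
  have hq : 4 * (pcell n s i).toNat + 2 * (pcell n s (i + 1)).toNat + (pcell n s (i + 2)).toNat < 8 := by
    have t1 := Bool.toNat_le (pcell n s i)
    have t2 := Bool.toNat_le (pcell n s (i + 1))
    have t3 := Bool.toNat_le (pcell n s (i + 2))
    omega
  rw [ruleGet num hnum _ hq]
  rw [stepB_testBit (top8 num.natAbs) n s hs (n - 1 - i) (by omega)]
  have e1 : s.testBit (n - 1 - i + 1) = pcell n s i := by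
    unfold pcell
    by_cases h0 : 1 ≤ i ∧ i ≤ n
    · rw [if_pos h0]
      congr 1
      omega
    · have hz : i = 0 := by omega
      subst hz
      rw [if_neg h0]
      rw [show n - 1 - 0 + 1 = n from by omega]
      exact Nat.testBit_lt_two_pow hs
  have e2 : s.testBit (n - 1 - i) = pcell n s (i + 1) := by
    unfold pcell
    rw [if_pos ⟨by omega, by omega⟩]
    congr 1
    omega
  have e3 : (decide (1 ≤ n - 1 - i) && s.testBit (n - 1 - i - 1)) = pcell n s (i + 2) := by
    unfold pcell
    by_cases h0 : i + 2 ≤ n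
    · rw [if_pos ⟨by omega, h0⟩]
      rw [show decide (1 ≤ n - 1 - i) = true from by simp; omega, Bool.true_and]
      congr 1
      omega
    · rw [if_neg (by omega)]
      rw [show decide (1 ≤ n - 1 - i) = false from by simp; omega, Bool.false_and]
  rw [e1, e2, e3]

lemma rowB_eq (n s : Nat) :
    (List.range n).map (fun i => if (s >>> (n - 1 - i)) &&& 1 ≠ 0 then "1" else "0") = rowOf n s := by
  unfold rowOf
  apply List.map_congr_left
  intro i _
  rw [ite_bit]
  cases h : s.testBit (n - 1 - i) <;> simp [h, bitStr]

lemma loop_eq (num : Int) (hnum : 0 ≤ num) (n : Nat) (hn : 1 ≤ n)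
    (l : List Nat) (g : List (List String)) (s : Nat) (hs : s < 2 ^ n) :
    (l.foldl (fun (st : List (List String) × List String) _ =>
        (st.1 ++ [st.2],
         (List.range ((["0"] ++ st.2 ++ ["0"]).length - 2)).map (fun (i : Nat) =>
            (rule num).getD (PySem.Str.join ""
              (PySem.List.slice (["0"] ++ st.2 ++ ["0"]) (some (i : Int)) (some ((i : Int) + 3)))) "")))
      (g, rowOf n s)).1
    = (l.foldl (fun (st : List (List String) × Nat) _ =>
        (st.1 ++ [rowOf n st.2], stepB (top8 num.natAbs) n st.2)) (g, s)).1 := by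
  induction l generalizing g s with
  | nil => rfl
  | cons x xs ih =>
    simp only [List.foldl_cons]
    rw [step_eq num hnum n s hn hs]
    exact ih (g ++ [rowOf n s]) (stepB (top8 num.natAbs) n s) (stepB_lt _ _ _ hs)

theorem cellular_automaton_spec : Claim_equal_cellular_automaton := by
  intro rule_num steps _hdom hpre
  obtain ⟨hs1, hr0, hr255⟩ := hpre
  unfold Spec_cellular_automaton cellular_automaton cellular_automaton_alt
  have hn1 : 1 ≤ steps.toNat := by omega
  set n := steps.toNat with hn
  -- A's initial row
  have hfd : PySem.Int.floordiv steps 2 = ((n / 2 : Nat) : Int) := by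
    rw [show steps = ((n : Nat) : Int) from by omega]
    exact_mod_cast PySem.Int.floordiv_natCast n 2
  dsimp only
  rw [hfd]
  have hset : PySem.List.pySet? (List.replicate n "0") (((n / 2 : Nat) : Nat) : Int) "1"
      = some ((List.replicate n "0").set (n / 2) "1") :=
    PySem.List.pySet?_natCast _ _ _ (by rw [List.length_replicate]; omega)
  rw [hset]
  -- under Pre_ (rule_num ≤ 255), the top 8 format digits are rule_num itself
  have htop : top8 rule_num.natAbs = rule_num.natAbs := by
    unfold top8
    have hbl : PySem.Int.bitLength ((rule_num.natAbs : Nat) : Int) ≤ 8 := by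
      by_contra hgt
      have h9 : 9 ≤ PySem.Int.bitLength ((rule_num.natAbs : Nat) : Int) := by omega
      have hne : ((rule_num.natAbs : Nat) : Int) ≠ 0 := by
        intro h0
        rw [h0] at h9
        simp [PySem.Int.bitLength_zero] at h9
      have := PySem.Int.two_pow_bitLength_le ((rule_num.natAbs : Nat) : Int) hne
      have h256 : (2 : Nat) ^ 8 ≤ 2 ^ (PySem.Int.bitLength ((rule_num.natAbs : Nat) : Int) - 1) :=
        Nat.pow_le_pow_right (by norm_num) (by omega)
      simp only [Int.natAbs_natCast] at this
      omega
    rw [Nat.max_eq_left hbl, Nat.sub_self, Nat.shiftRight_zero]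
  -- the initial state bound
  have hs0 : 1 <<< (n - 1 - n / 2) < 2 ^ n := by
    rw [Nat.one_shiftLeft]
    exact Nat.pow_lt_pow_right (by norm_num) (by omega)
  rw [init_row n hn1]
  -- B's fold body is the lemma's fold body
  have hB : (fun (st : List (List String) × Nat) (_ : Nat) =>
      (st.1 ++ [(List.range n).map (fun i =>
          if (st.2 >>> (n - 1 - i)) &&& 1 ≠ 0 then "1" else "0")],
       (List.range 8).foldl (fun (acc : Nat) (p : Nat) =>
          if PySem.Int.band (rule_num >>> p) 1 ≠ 0 then
            acc ||| ((if p &&& 4 ≠ 0 then st.2 >>> 1 else (st.2 >>> 1) ^^^ ((1 <<< n) - 1))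
                &&& (if p &&& 2 ≠ 0 then st.2 else st.2 ^^^ ((1 <<< n) - 1))
                &&& (if p &&& 1 ≠ 0 then (st.2 <<< 1) &&& ((1 <<< n) - 1)
                     else ((st.2 <<< 1) &&& ((1 <<< n) - 1)) ^^^ ((1 <<< n) - 1)))
          else acc) 0))
      = (fun (st : List (List String) × Nat) (_ : Nat) =>
          (st.1 ++ [rowOf n st.2], stepB (top8 rule_num.natAbs) n st.2)) := by
    funext st x
    rw [rowB_eq]
    have hcond : ∀ p : Nat,
        (PySem.Int.band (rule_num >>> p) 1 ≠ 0)
          = (((top8 rule_num.natAbs) >>> p) &&& 1 ≠ 0) := by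
      intro p
      rw [htop, show rule_num = ((rule_num.natAbs : Nat) : Int) from (Int.natAbs_of_nonneg hr0).symm,
        cast_shiftRight]
      exact propext (band_one_cast _)
    simp only [hcond]
    rfl
  simp only [hB]
  exact loop_eq rule_num hr0 n hn1 (List.range n) [] (1 <<< (n - 1 - n / 2)) hs0
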